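-- pv_equiv track=rewrite | github.com/twannylvsmusic-maker/Wordsearch-generator | utils/shape_masks.py | create_triangle_mask
-- ===== SOURCE A (Python) =====
-- def create_triangle_mask(size):
--     """Create a triangle-shaped mask."""
--     mask = []
--     center = size // 2
--
--     for i in range(size):
--         row = []
--         for j in range(size):
--             # Triangle: y >= center - x and y >= x - center and y <= center
--             if i <= center and j >= center - i and j <= center + i:
--                 row.append(True)
--             else:
--                 row.append(False)
--         mask.append(row)
--
--     return mask
-- ===== SOURCE B (Python) =====
-- def create_triangle_mask(size):
--     """Create a triangle-shaped mask."""
--     center = size // 2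
--     mask = []
--     for i in range(size):
--         if i > center:
--             mask.append([False] * size)
--         else:
--             start = center - i
--             end = min(center + i, size - 1)
--             mask.append([False] * start + [True] * (end - start + 1) + [False] * (size - 1 - end))
--     return mask
-- ===== Notes on version B (the rewrite author's own statement) =====
-- stated objective: simpler
-- what changed: Each row is constructed directly as False-padding + a True run (with the right edge clamped by min) instead of testing the triangle inequalities at every one of the n^2 cells.
import Mathlib
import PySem

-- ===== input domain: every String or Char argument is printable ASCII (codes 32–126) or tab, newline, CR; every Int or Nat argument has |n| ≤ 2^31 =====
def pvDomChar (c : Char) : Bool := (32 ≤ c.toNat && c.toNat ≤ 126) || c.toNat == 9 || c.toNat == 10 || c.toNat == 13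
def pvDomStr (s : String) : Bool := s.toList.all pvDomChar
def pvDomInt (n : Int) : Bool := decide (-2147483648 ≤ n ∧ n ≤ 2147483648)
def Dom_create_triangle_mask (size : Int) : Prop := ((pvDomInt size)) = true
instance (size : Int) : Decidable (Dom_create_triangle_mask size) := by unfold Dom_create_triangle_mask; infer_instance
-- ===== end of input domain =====

-- B builds each row directly as False-padding + a True run instead of testing every cell.

-- ===== PORT A =====
def create_triangle_mask (size : Int) : List (List Bool) :=
  let center := PySem.Int.floordiv size 2
  (PySem.List.pyRange 0 size 1).foldl (fun mask i =>
    mask ++ [(PySem.List.pyRange 0 size 1).foldl (fun row j =>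
      row ++ [decide (i ≤ center ∧ j ≥ center - i ∧ j ≤ center + i)]) []]) []

-- ===== PORT B =====
def create_triangle_mask_alt (size : Int) : List (List Bool) :=
  let center := PySem.Int.floordiv size 2
  (PySem.List.pyRange 0 size 1).foldl (fun mask i =>
    if i > center then mask ++ [List.replicate size.toNat false]
    else
      let start := center - i
      let e := min (center + i) (size - 1)
      mask ++ [List.replicate start.toNat false ++ List.replicate (e - start + 1).toNat true
                ++ List.replicate (size - 1 - e).toNat false]) []

-- ===== PRECONDITION & SPEC =====
def Spec_create_triangle_mask (size : Int) (out : List (List Bool)) : Prop := out = create_triangle_mask_alt size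
instance (size : Int) (out : List (List Bool)) : Decidable (Spec_create_triangle_mask size out) := by unfold Spec_create_triangle_mask; infer_instance

-- ===== CLAIM (what is proved, stated in full; the proofs are below) =====
def Claim_equal_create_triangle_mask : Prop := ∀ (size : Int), Dom_create_triangle_mask size → Spec_create_triangle_mask size (create_triangle_mask size)

-- ===== LEMMAS AND PROOFS =====

-- A's inner j-loop produces exactly B's padded True-run row, for each i of the outer range.
theorem pv_row_eq (size center i : Int) (hc : center = PySem.Int.floordiv size 2)
    (hi0 : 0 ≤ i) (hin : i < size) :
    (PySem.List.pyRange 0 size 1).foldl (fun row j =>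
      row ++ [decide (i ≤ center ∧ j ≥ center - i ∧ j ≤ center + i)]) []
    = if i > center then List.replicate size.toNat false
      else
        List.replicate (center - i).toNat false
          ++ List.replicate (min (center + i) (size - 1) - (center - i) + 1).toNat true
          ++ List.replicate (size - 1 - min (center + i) (size - 1)).toNat false := by
  have hsz : 0 < size := lt_of_le_of_lt hi0 hin
  have hc2 : 2 * center ≤ size ∧ size ≤ 2 * center + 1 := by
    rw [hc, PySem.Int.floordiv_eq_ediv_of_pos (by omega)]; omega
  clear hc
  have hfold : ∀ (l : List Int) (f : Int → Bool),
      l.foldl (fun r j => r ++ [f j]) [] = l.map f := by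
    intro l f
    suffices h : ∀ init : List Bool, l.foldl (fun r j => r ++ [f j]) init = init ++ l.map f by
      simpa using h []
    induction l with
    | nil => intro init; simp
    | cons x xs ih => intro init; simp only [List.foldl_cons, List.map_cons, ih, List.append_assoc, List.singleton_append]
  rw [hfold]
  split
  · -- i > center: every cell is False
    rename_i hgt
    refine List.eq_replicate_iff.mpr ⟨by simp only [List.length_map, PySem.List.length_pyRange_one]; omega, ?_⟩
    intro b hb
    rcases List.mem_map.mp hb with ⟨j, _, hj⟩
    rw [← hj, decide_eq_false_iff_not]
    omega
  · -- i ≤ center: padded True run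
    rename_i hle
    apply List.ext_getElem
    · simp only [List.length_map, PySem.List.length_pyRange_one, List.length_append,
        List.length_replicate]
      omega
    · intro k hk1 hk2
      simp only [List.length_map, PySem.List.length_pyRange_one] at hk1
      simp only [List.length_append, List.length_replicate] at hk2
      rw [List.getElem_map, PySem.List.getElem_pyRange_one]
      simp only [List.getElem_append, List.getElem_replicate, List.length_replicate, List.length_append]
      split_ifs with h1 h2
      · rw [decide_eq_false_iff_not]; omega
      · rw [decide_eq_true_eq]; omega
      · rw [decide_eq_false_iff_not]; omega

theorem create_triangle_mask_eq (size : Int) :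
    create_triangle_mask size = create_triangle_mask_alt size := by
  unfold create_triangle_mask create_triangle_mask_alt
  apply PySem.List.foldl_congr_mem
  intro mask i hi
  rw [PySem.List.mem_pyRange_one] at hi
  rw [pv_row_eq size _ i rfl hi.1 hi.2]
  split <;> rfl

-- ===== VERDICT (by name: the statement is the Claim_ definition above) =====
theorem create_triangle_mask_spec : Claim_equal_create_triangle_mask := by
  intro size _
  exact create_triangle_mask_eq size
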